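-- pv_equiv track=rewrite | github.com/OscarBrunelle/projects | games/guess_game_resolver.py | near_min
-- ===== SOURCE A (Python) =====
-- def near_min(n,prob_list,x):
--     y2=n
--     for number in prob_list:
--         y1=x-number
--         if y1 <0:
--             return 0
--         else:
--             if y1<y2:
--                 y2=y1
--     return y2
-- ===== SOURCE B (Python) =====
-- def near_min(n, prob_list, x):
--     if not prob_list:
--         return n
--     m = max(prob_list)
--     if m > x:
--         return 0
--     return min(n, x - m)
-- ===== Notes on version B (the rewrite author's own statement) =====
-- stated objective: simpler
-- what changed: Replaced the early-exit min-tracking loop by a closed form: m = max(prob_list); return n on empty, 0 if m > x, else min(n, x - m).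
import Mathlib
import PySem

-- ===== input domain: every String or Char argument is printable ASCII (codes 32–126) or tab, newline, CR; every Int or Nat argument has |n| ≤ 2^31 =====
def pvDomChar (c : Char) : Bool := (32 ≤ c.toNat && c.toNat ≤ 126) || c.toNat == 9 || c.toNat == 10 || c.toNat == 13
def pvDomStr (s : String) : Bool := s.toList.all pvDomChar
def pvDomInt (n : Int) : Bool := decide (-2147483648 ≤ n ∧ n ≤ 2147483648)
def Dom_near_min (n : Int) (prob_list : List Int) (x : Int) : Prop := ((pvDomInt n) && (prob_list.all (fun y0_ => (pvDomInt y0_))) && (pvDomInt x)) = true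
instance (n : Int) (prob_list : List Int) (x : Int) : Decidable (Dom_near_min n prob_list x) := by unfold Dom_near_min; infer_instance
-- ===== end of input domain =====

-- B replaces A's early-exit min-tracking loop by a closed form over max(prob_list); objective: simpler.

-- ===== PORT A =====
-- the for-loop with early return: y2 is the running minimum
def near_min_loop (x : Int) : List Int → Int → Int
  | [], y2 => y2
  | number :: rest, y2 =>
    let y1 := x - number
    if y1 < 0 then 0
    else if y1 < y2 then near_min_loop x rest y1
    else near_min_loop x rest y2

def near_min (n : Int) (prob_list : List Int) (x : Int) : Int :=
  near_min_loop x prob_list n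

-- ===== PORT B =====
def near_min_alt (n : Int) (prob_list : List Int) (x : Int) : Int :=
  match prob_list with
  | [] => n
  | h :: t =>
    let m := t.foldl max h   -- max(prob_list)
    if m > x then 0 else min n (x - m)

-- ===== PRECONDITION & SPEC =====
def Spec_near_min (n : Int) (prob_list : List Int) (x : Int) (out : Int) : Prop := out = near_min_alt n prob_list x
instance (n : Int) (prob_list : List Int) (x : Int) (out : Int) : Decidable (Spec_near_min n prob_list x out) := by unfold Spec_near_min; infer_instance

-- ===== CLAIM (what is proved, stated in full; the proofs are below) =====
def Claim_equal_near_min : Prop := ∀ (n : Int) (prob_list : List Int) (x : Int), Dom_near_min n prob_list x → Spec_near_min n prob_list x (near_min n prob_list x)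

-- ===== LEMMAS AND PROOFS =====

theorem near_min_loop_cons (x number : Int) (rest : List Int) (y2 : Int) :
    near_min_loop x (number :: rest) y2 =
      (if x - number < 0 then 0
       else if x - number < y2 then near_min_loop x rest (x - number)
       else near_min_loop x rest y2) := rfl


theorem foldl_max_max (t : List Int) (a b : Int) :
    t.foldl max (max a b) = max a (t.foldl max b) := by
  induction t generalizing b with
  | nil => simp
  | cons c t ih => simp [List.foldl, max_assoc, ih]

theorem near_min_loop_eq (x : Int) (h : Int) (t : List Int) (y2 : Int) :
    near_min_loop x (h :: t) y2 =
      (if t.foldl max h > x then 0 else min y2 (x - t.foldl max h)) := by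
  induction t generalizing h y2 with
  | nil =>
    simp only [near_min_loop, List.foldl]
    split_ifs <;> omega
  | cons a t ih =>
    have hm : (a :: t).foldl max h = max h (t.foldl max a) := by
      simp [List.foldl, foldl_max_max]
    rw [near_min_loop_cons, ih, ih, hm]
    rcases le_total h (t.foldl max a) with hle | hle <;>
      simp only [max_eq_right hle, max_eq_left hle, min_def] <;>
      split_ifs <;> omega

-- ===== VERDICT (by name: the statement is the Claim_ definition above) =====
theorem near_min_spec : Claim_equal_near_min := by
  intro n prob_list x _
  unfold Spec_near_min near_min near_min_alt
  cases prob_list with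
  | nil => rfl
  | cons h t => simp only [near_min_loop_eq]
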